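-- pv_equiv track=rewrite | github.com/johnnie193/Open-Theatre | utils.py | sample_script
-- ===== SOURCE A (Python) =====
-- def get_values(content):
--     if isinstance(content, dict):
--         return list(content.values())
--
-- def sample_script(scene_script, x):
--     _samples = {}
--     for v in get_values(scene_script["stream"]):
--         for li in v:
--             k, li = li.split("$")
--             if k in _samples:
--                 _samples[k] += [li]
--             else:
--                 _samples[k] = [li]
--     x = x.split("$")[0] if x else x
--     return _samples.get(x, [])
-- ===== SOURCE B (Python) =====
-- def get_values(content):
--     if isinstance(content, dict):
--         return list(content.values())
--
-- def sample_script(scene_script, x):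
--     # Single filtering pass: compute the target key once, keep only its entries,
--     # instead of building the full group-by dict and looking up one key.
--     target = x.split("$")[0] if x else x
--     result = []
--     for v in get_values(scene_script["stream"]):
--         for li in v:
--             k, li = li.split("$")
--             if k == target:
--                 result.append(li)
--     return result
-- ===== Notes on version B (the rewrite author's own statement) =====
-- stated objective: simpler
-- what changed: B computes the target key once and collects matching entries in one filtering pass, instead of building the complete group-by dictionary and then looking up a single key.
import Mathlib
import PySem

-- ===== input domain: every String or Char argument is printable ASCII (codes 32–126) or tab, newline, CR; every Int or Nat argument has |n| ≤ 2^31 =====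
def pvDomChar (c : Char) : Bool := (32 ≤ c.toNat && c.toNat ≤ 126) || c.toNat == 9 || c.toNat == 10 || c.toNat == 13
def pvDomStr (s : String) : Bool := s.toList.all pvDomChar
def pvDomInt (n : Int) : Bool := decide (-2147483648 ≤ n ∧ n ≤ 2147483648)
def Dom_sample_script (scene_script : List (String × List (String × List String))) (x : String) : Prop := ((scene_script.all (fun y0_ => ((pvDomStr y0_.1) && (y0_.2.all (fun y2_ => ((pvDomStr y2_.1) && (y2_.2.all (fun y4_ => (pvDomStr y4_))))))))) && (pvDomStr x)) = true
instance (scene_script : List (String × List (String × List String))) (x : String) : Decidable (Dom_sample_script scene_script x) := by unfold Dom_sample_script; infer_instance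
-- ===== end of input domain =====

-- B computes the target key once and collects matching entries in one filtering pass,
-- instead of building the complete group-by dictionary and then looking up one key (objective: simpler).

-- ===== PORT A =====
-- A builds the full grouping dict _samples, then returns _samples.get(x', []).
def sample_script (scene_script : List (String × List (String × List String))) (x : String) : List String :=
  let stream := PySem.Dict.ofList ((PySem.Dict.ofList scene_script).getD "stream" [])
  let samples := stream.values.foldl (fun d v =>
      v.foldl (fun d li =>
        match PySem.Str.split? li "$" with
        | some [k, w] =>
          if d.contains k then d.insert k (d.getD k [] ++ [w])
          else d.insert k [w]
        | _ => d) d)   -- non-2-way split raises ValueError in Python: excluded by Pre_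
      (PySem.Dict.empty : PySem.Dict String (List String))
  let x' := if x == "" then x else ((PySem.Str.split? x "$").getD []).headD ""   -- split always nonempty, so [0] is total
  samples.getD x' []

-- ===== PORT B =====
-- B's inner-loop body: k, li = li.split("$"); if k == target: result.append(li)
def altStep (target : String) (acc : List String) (li : String) : List String :=
  let parts := (PySem.Str.split? li "$").getD []   -- "$" ≠ "" so split? is always some
  if parts.length == 2 then   -- a non-2-way split raises ValueError in Python: excluded by Pre_
    if parts.headD "" == target then acc ++ [parts.tail.headD ""] else acc
  else acc

def sample_script_alt (scene_script : List (String × List (String × List String))) (x : String) : List String :=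
  let target := if x == "" then x else ((PySem.Str.split? x "$").getD []).headD ""
  let stream := PySem.Dict.ofList ((PySem.Dict.ofList scene_script).getD "stream" [])
  stream.values.foldl (fun acc v => v.foldl (altStep target) acc) []

-- ===== PRECONDITION & SPEC =====
-- Pre_ excludes exactly the inputs on which the Python raises: a missing "stream" key
-- (KeyError) and entries whose '$'-split is not exactly two pieces (ValueError on unpack).
def Pre_sample_script (scene_script : List (String × List (String × List String))) (_x : String) : Prop :=
  ((PySem.Dict.ofList scene_script).contains "stream") = true ∧
  (((PySem.Dict.ofList ((PySem.Dict.ofList scene_script).getD "stream" [])).values).all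
    (fun v => v.all (fun li => ((PySem.Str.split? li "$").getD []).length == 2))) = true
instance (scene_script : List (String × List (String × List String))) (x : String) : Decidable (Pre_sample_script scene_script x) := by unfold Pre_sample_script; infer_instance

def pvWitness_sample_script : (List (String × List (String × List String))) × String :=
  ([("stream", [("a", ["k$v", "j$w"]), ("b", ["k$u"])])], "k")

def Spec_sample_script (scene_script : List (String × List (String × List String))) (x : String) (out : List String) : Prop := out = sample_script_alt scene_script x
instance (scene_script : List (String × List (String × List String))) (x : String) (out : List String) : Decidable (Spec_sample_script scene_script x out) := by unfold Spec_sample_script; infer_instance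

-- ===== CLAIM (what is proved, stated in full; the proofs are below) =====
def Claim_equal_sample_script : Prop := ∀ (scene_script : List (String × List (String × List String))) (x : String), Dom_sample_script scene_script x → Pre_sample_script scene_script x → Spec_sample_script scene_script x (sample_script scene_script x)

-- ===== LEMMAS AND PROOFS =====

-- one grouping-dict step, observed at key t, equals one filtering step
lemma step_getD (t li : String) (d : PySem.Dict String (List String)) :
    (match PySem.Str.split? li "$" with
     | some [k, w] =>
       if d.contains k then d.insert k (d.getD k [] ++ [w])
       else d.insert k [w]
     | _ => d).getD t []
    = altStep t (d.getD t []) li := by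
  unfold altStep
  cases ho : PySem.Str.split? li "$" with
  | none => simp
  | some l =>
    match l with
    | [] => simp
    | [a] => simp
    | a :: b :: c :: tl3 => simp
    | [a, b] =>
      simp only [Option.getD_some, List.length_cons, List.length_nil, Nat.reduceAdd,
        beq_self_eq_true, if_true, List.headD_cons, List.tail_cons]
      simp only [beq_iff_eq]
      by_cases hc : d.contains a = true
      · rw [if_pos hc, PySem.Dict.getD_insert]
        by_cases ht : a = t
        · subst ht; simp
        · rw [if_neg (fun h => ht h.symm), if_neg ht]
      · rw [if_neg hc, PySem.Dict.getD_insert]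
        by_cases ht : a = t
        · subst ht
          rw [if_pos rfl, if_pos rfl,
            PySem.Dict.getD_of_not_contains _ _ (by simpa using hc)]
          simp
        · rw [if_neg (fun h => ht h.symm), if_neg ht]

-- the inner loop over one value list, observed at key t
lemma inner_getD (t : String) (ls : List String) (d : PySem.Dict String (List String)) :
    (ls.foldl (fun d li =>
        match PySem.Str.split? li "$" with
        | some [k, w] =>
          if d.contains k then d.insert k (d.getD k [] ++ [w])
          else d.insert k [w]
        | _ => d) d).getD t []
    = ls.foldl (altStep t) (d.getD t []) := by
  induction ls generalizing d with
  | nil => rfl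
  | cons li ls ih =>
    simp only [List.foldl_cons]
    rw [ih, step_getD]

-- the outer loop over all value lists, observed at key t
lemma outer_getD (t : String) (vs : List (List String)) (d : PySem.Dict String (List String)) :
    (vs.foldl (fun d v =>
        v.foldl (fun d li =>
          match PySem.Str.split? li "$" with
          | some [k, w] =>
            if d.contains k then d.insert k (d.getD k [] ++ [w])
            else d.insert k [w]
          | _ => d) d) d).getD t []
    = vs.foldl (fun acc v => v.foldl (altStep t) acc) (d.getD t []) := by
  induction vs generalizing d with
  | nil => rfl
  | cons v vs ih =>
    simp only [List.foldl_cons]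
    rw [ih, inner_getD]

-- ===== VERDICT (by name: the statement is the Claim_ definition above) =====
theorem sample_script_spec : Claim_equal_sample_script := by
  intro scene_script x _ _
  unfold Spec_sample_script sample_script sample_script_alt
  rw [outer_getD, PySem.Dict.getD_empty]
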